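-- pv_equiv track=rewrite | github.com/YangYimin98/Leetcode_Routine | Yimin_Yang/Uber_Interview_Task_2.py | efficientCabScheduling
-- ===== SOURCE A (Python) =====
-- def efficientCabScheduling(n, cabTripTime):
--     if len(cabTripTime) == 1:
--         return n * cabTripTime[0]
--     else:
--         trips, time = 0, 0
--         while trips < n:
--             time += 1
--             for i in cabTripTime:
--                 if time % i == 0:
--                     trips += 1
--         return time
-- ===== SOURCE B (Python) =====
-- def efficientCabScheduling(n, cabTripTime):
--     if len(cabTripTime) == 1:
--         return n * cabTripTime[0]
--     if n <= 0:
--         return 0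
--     lo, hi = 1, n * min(cabTripTime)
--     while lo < hi:
--         mid = (lo + hi) // 2
--         if sum(mid // i for i in cabTripTime) >= n:
--             hi = mid
--         else:
--             lo = mid + 1
--     return lo
-- ===== Notes on version B (the rewrite author's own statement) =====
-- stated objective: faster
-- what changed: Replaces A's minute-by-minute simulation (increment time, scan all cabs for divisors, until n trips) with a binary search on the finish time using the counting function count(t)=sum(t//i), plus a direct 0 for n<=0.
-- outside the precondition, e.g. on efficientCabScheduling(2, [-2, 3]): A returns 3, B returns 1
import Mathlib
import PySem

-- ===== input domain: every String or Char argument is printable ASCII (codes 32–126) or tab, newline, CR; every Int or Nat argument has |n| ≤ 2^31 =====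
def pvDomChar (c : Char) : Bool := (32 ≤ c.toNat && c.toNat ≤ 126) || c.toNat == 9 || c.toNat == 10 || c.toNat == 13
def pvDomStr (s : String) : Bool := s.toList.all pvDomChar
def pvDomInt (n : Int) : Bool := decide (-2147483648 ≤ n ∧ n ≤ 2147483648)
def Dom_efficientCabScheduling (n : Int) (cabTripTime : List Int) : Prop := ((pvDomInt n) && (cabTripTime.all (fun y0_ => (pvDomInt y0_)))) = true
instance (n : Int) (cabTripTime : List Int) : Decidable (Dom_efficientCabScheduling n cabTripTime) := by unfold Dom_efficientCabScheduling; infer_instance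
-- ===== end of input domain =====

-- B replaces A's minute-by-minute simulation with a binary search on the finish time
-- using count(t) = sum(t // i); return value only, no mutation on either side.

-- ===== PORT A =====
-- A's `while trips < n` loop; the fuel argument only makes the recursion total in Lean:
-- on every input admitted by Pre_ the loop exits (trips ≥ n) before the fuel runs out.
def pvALoop (n : Int) (L : List Int) : Nat → Int → Int → Int
  | 0, _, time => time
  | f + 1, trips, time =>
    if trips < n then
      pvALoop n L f
        (L.foldl (fun tr i => if PySem.Int.mod (time + 1) i = 0 then tr + 1 else tr) trips)
        (time + 1)
    else time

def efficientCabScheduling (n : Int) (cabTripTime : List Int) : Int :=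
  if cabTripTime.length = 1 then n * PySem.List.pyGetD cabTripTime 0 0
  else pvALoop n cabTripTime
    ((n * ((PySem.List.min? cabTripTime id).getD 1)).toNat + 1) 0 0

-- ===== PORT B =====
def pvCount (L : List Int) (t : Int) : Int :=
  (L.map (fun i => PySem.Int.floordiv t i)).sum

def pvBSearch (n : Int) (L : List Int) (lo hi : Int) : Int :=
  if h : lo < hi then
    let mid := PySem.Int.floordiv (lo + hi) 2
    if pvCount L mid ≥ n then pvBSearch n L lo mid
    else pvBSearch n L (mid + 1) hi
  else lo
termination_by (hi - lo).toNat
decreasing_by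
  all_goals
    have hb := PySem.Int.floordiv_two_mid_bounds (lo := lo) (hi := hi) (le_of_lt h)
    have hlt := (PySem.Int.floordiv_lt_iff_lt_mul (a := lo + hi) (b := 2) (q := hi)
      (by omega)).mpr (by omega)
    omega

def efficientCabScheduling_alt (n : Int) (cabTripTime : List Int) : Int :=
  if cabTripTime.length = 1 then n * PySem.List.pyGetD cabTripTime 0 0
  else if n ≤ 0 then 0
  else pvBSearch n cabTripTime 1 (n * ((PySem.List.min? cabTripTime id).getD 0))

-- ===== PRECONDITION & SPEC =====
-- Pre_ keeps multi-cab inputs with n ≥ 1 to positive trip durations, the task's natural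
-- domain: outside it A raises ZeroDivisionError on a 0 duration, counts a negative
-- duration by divisibility of its absolute value, and diverges on the empty list.
def Pre_efficientCabScheduling (n : Int) (cabTripTime : List Int) : Prop :=
  cabTripTime.length = 1 ∨ n ≤ 0 ∨ (cabTripTime ≠ [] ∧ ∀ x ∈ cabTripTime, 1 ≤ x)
instance (n : Int) (cabTripTime : List Int) : Decidable (Pre_efficientCabScheduling n cabTripTime) := by unfold Pre_efficientCabScheduling; infer_instance

def pvWitness_efficientCabScheduling : Int × List Int := (3, [2, 3])

def Spec_efficientCabScheduling (n : Int) (cabTripTime : List Int) (out : Int) : Prop := out = efficientCabScheduling_alt n cabTripTime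
instance (n : Int) (cabTripTime : List Int) (out : Int) : Decidable (Spec_efficientCabScheduling n cabTripTime out) := by unfold Spec_efficientCabScheduling; infer_instance

-- ===== CLAIM (what is proved, stated in full; the proofs are below) =====
def Claim_equal_efficientCabScheduling : Prop := ∀ (n : Int) (cabTripTime : List Int), Dom_efficientCabScheduling n cabTripTime → Pre_efficientCabScheduling n cabTripTime → Spec_efficientCabScheduling n cabTripTime (efficientCabScheduling n cabTripTime)

-- ===== LEMMAS AND PROOFS =====

-- Quotient characterisation: s = q*i + r with 0 ≤ r < i gives s / i = q.
lemma pvDivShift (i q r s : Int) (h0 : 0 ≤ r) (h2 : r < i) (hs : s = q * i + r) :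
    s / i = q := by
  have hne : i ≠ 0 := by omega
  rw [show s = r + q * i by linear_combination hs,
    Int.add_mul_ediv_right _ _ hne, Int.ediv_eq_zero_of_lt h0 h2]
  ring

-- One Python minute: (t+1) // i gains 1 over t // i exactly when i divides t+1.
lemma pvFdivSucc (t i : Int) (hi : 0 < i) :
    (t + 1) / i = t / i + if (t + 1) % i = 0 then 1 else 0 := by
  have hne : i ≠ 0 := by omega
  have hsum := Int.ediv_add_emod (t + 1) i
  by_cases h : (t + 1) % i = 0
  · have h1 : t / i = (t + 1) / i - 1 :=
      pvDivShift i ((t + 1) / i - 1) (i - 1) t (by omega) (by omega)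
        (by linear_combination - hsum + h)
    rw [if_pos h, h1]; ring
  · have hr0 : 0 ≤ (t + 1) % i := Int.emod_nonneg _ hne
    have hr2 : (t + 1) % i < i := Int.emod_lt_of_pos _ hi
    have h1 : t / i = (t + 1) / i :=
      pvDivShift i ((t + 1) / i) ((t + 1) % i - 1) t (by omega) (by omega)
        (by linear_combination - hsum)
    rw [if_neg h, h1]; ring

lemma pvCount_zero (L : List Int) (hpos : ∀ x ∈ L, 1 ≤ x) : pvCount L 0 = 0 := by
  induction L with
  | nil => rfl
  | cons i L ih =>
    have hi : 1 ≤ i := hpos i (by simp)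
    simp only [pvCount, List.map_cons, List.sum_cons] at *
    rw [PySem.Int.floordiv_eq_ediv_of_pos (by omega), Int.zero_ediv,
      ih (fun x hx => hpos x (by simp [hx]))]
    ring

lemma pvCount_mono (L : List Int) (hpos : ∀ x ∈ L, 1 ≤ x) (s t : Int)
    (hst : s ≤ t) : pvCount L s ≤ pvCount L t := by
  induction L with
  | nil => simp [pvCount]
  | cons i L ih =>
    have hi : 1 ≤ i := hpos i (by simp)
    have ih' := ih (fun x hx => hpos x (by simp [hx]))
    simp only [pvCount, List.map_cons, List.sum_cons] at *
    rw [PySem.Int.floordiv_eq_ediv_of_pos (by omega),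
      PySem.Int.floordiv_eq_ediv_of_pos (by omega)]
    have := Int.ediv_le_ediv (by omega : (0:Int) < i) hst
    omega

-- A's inner `for` loop, started at any accumulator, adds pvCount L (t+1) - pvCount L t.
lemma pvCount_succ (L : List Int) (hpos : ∀ x ∈ L, 1 ≤ x) (t : Int) :
    ∀ c : Int, L.foldl (fun tr i => if PySem.Int.mod (t + 1) i = 0 then tr + 1 else tr) c
      = c + (pvCount L (t + 1) - pvCount L t) := by
  induction L with
  | nil => intro c; simp [pvCount]
  | cons i L ih =>
    intro c
    have hi : 1 ≤ i := hpos i (by simp)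
    have ih' := ih (fun x hx => hpos x (by simp [hx]))
    simp only [List.foldl_cons, pvCount, List.map_cons, List.sum_cons]
    rw [ih', PySem.Int.mod_eq_emod_of_pos (by omega),
      PySem.Int.floordiv_eq_ediv_of_pos (by omega),
      PySem.Int.floordiv_eq_ediv_of_pos (by omega), pvFdivSucc t i (by omega)]
    simp only [pvCount]
    by_cases h : (t + 1) % i = 0 <;> simp [h] <;> try ring

lemma pvCount_lower (L : List Int) (hpos : ∀ x ∈ L, 1 ≤ x) (n m : Int)
    (hm : m ∈ L) (hn : 0 ≤ n) : n ≤ pvCount L (n * m) := by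
  have hm1 : 1 ≤ m := hpos m hm
  have hterm : PySem.Int.floordiv (n * m) m = n := by
    rw [PySem.Int.floordiv_eq_ediv_of_pos (by omega)]
    exact Int.mul_ediv_cancel n (by omega)
  have hmem : PySem.Int.floordiv (n * m) m ∈ L.map (fun i => PySem.Int.floordiv (n * m) i) :=
    List.mem_map_of_mem hm
  have hnn : ∀ x ∈ L.map (fun i => PySem.Int.floordiv (n * m) i), 0 ≤ x := by
    intro x hx
    obtain ⟨i, hiL, rfl⟩ := List.mem_map.mp hx
    have hi : 1 ≤ i := hpos i hiL
    rw [PySem.Int.floordiv_eq_ediv_of_pos (by omega)]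
    exact Int.ediv_nonneg (by positivity) (by omega)
  have := List.single_le_sum hnn _ hmem
  rw [hterm] at this
  exact this

-- A's while loop, started at any already-simulated minute t ≤ T with trips = pvCount L t
-- and enough fuel, stops exactly at the first minute T with pvCount L T ≥ n.
lemma pvALoop_eq (n : Int) (L : List Int) (T : Int)
    (hpos : ∀ x ∈ L, 1 ≤ x) (hT1 : n ≤ pvCount L T)
    (hmin : ∀ s : Int, 0 ≤ s → s < T → pvCount L s < n) :
    ∀ (f : Nat) (t : Int), 0 ≤ t → t ≤ T → T ≤ t + f →
      pvALoop n L f (pvCount L t) t = T := by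
  intro f
  induction f with
  | zero => intro t ht0 htT hTt; simp only [pvALoop]; omega
  | succ f ih =>
    intro t ht0 htT hTt
    by_cases hc : pvCount L t < n
    · have htT' : t < T := by
        rcases lt_or_eq_of_le htT with h | h
        · exact h
        · exfalso; rw [h] at hc; omega
      simp only [pvALoop, if_pos hc]
      rw [pvCount_succ L hpos t (pvCount L t),
        show pvCount L t + (pvCount L (t + 1) - pvCount L t) = pvCount L (t + 1) by ring]
      exact ih (t + 1) (by omega) (by omega) (by omega)
    · have : ¬ t < T := fun h => hc (hmin t ht0 h)
      simp only [pvALoop, if_neg hc]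
      omega

-- B's binary search maintains lo ≤ T ≤ hi and converges to the same first minute T.
lemma pvBSearch_eq (n : Int) (L : List Int) (T : Int)
    (hpos : ∀ x ∈ L, 1 ≤ x) (hT0 : 0 ≤ T) (hT1 : n ≤ pvCount L T)
    (hmin : ∀ s : Int, 0 ≤ s → s < T → pvCount L s < n)
    (lo hi : Int) (hlo0 : 0 ≤ lo) (hloT : lo ≤ T) (hThi : T ≤ hi) :
    pvBSearch n L lo hi = T := by
  rw [pvBSearch]
  by_cases h : lo < hi
  · rw [dif_pos h]
    have hb := PySem.Int.floordiv_two_mid_bounds (lo := lo) (hi := hi) (le_of_lt h)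
    have hlt := (PySem.Int.floordiv_lt_iff_lt_mul (a := lo + hi) (b := 2) (q := hi)
      (by omega)).mpr (by omega)
    by_cases hc : pvCount L (PySem.Int.floordiv (lo + hi) 2) ≥ n
    · simp only [if_pos hc]
      have hTm : T ≤ PySem.Int.floordiv (lo + hi) 2 := by
        by_contra hx
        have := hmin (PySem.Int.floordiv (lo + hi) 2) (by omega) (by omega)
        omega
      exact pvBSearch_eq n L T hpos hT0 hT1 hmin lo _ hlo0 hloT hTm
    · simp only [if_neg hc]
      have hmT : PySem.Int.floordiv (lo + hi) 2 < T := by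
        by_contra hx
        exact hc (le_trans hT1 (pvCount_mono L hpos T _ (by omega)))
      exact pvBSearch_eq n L T hpos hT0 hT1 hmin _ hi (by omega) (by omega) hThi
  · rw [dif_neg h]; omega
termination_by (hi - lo).toNat
decreasing_by
  all_goals
    have hb := PySem.Int.floordiv_two_mid_bounds (lo := lo) (hi := hi) (le_of_lt h)
    have hlt := (PySem.Int.floordiv_lt_iff_lt_mul (a := lo + hi) (b := 2) (q := hi)
      (by omega)).mpr (by omega)
    omega

-- ===== VERDICT (by name: the statement is the Claim_ definition above) =====
theorem efficientCabScheduling_spec : Claim_equal_efficientCabScheduling := by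
  intro n L _hDom hPre
  unfold Spec_efficientCabScheduling
  by_cases h1 : L.length = 1
  · simp [efficientCabScheduling, efficientCabScheduling_alt, h1]
  · by_cases h2 : n ≤ 0
    · simp only [efficientCabScheduling, efficientCabScheduling_alt, if_neg h1, if_pos h2,
        pvALoop, if_neg (by omega : ¬ (0:Int) < n)]
    · rcases hPre with h | h | ⟨hne, hpos⟩
      · exact absurd h h1
      · exact absurd h h2
      rw [not_le] at h2
      obtain ⟨m, hm⟩ : ∃ m, PySem.List.min? L id = some m := by
        cases hmm : PySem.List.min? L id with
        | none => exact absurd ((PySem.List.min?_eq_none_iff L id).mp hmm) hne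
        | some m => exact ⟨m, rfl⟩
      have hm1 : 1 ≤ m := hpos m (PySem.List.min?_mem hm)
      have hnm0 : 0 ≤ n * m := by positivity
      have hex : ∃ k : Nat, n ≤ pvCount L (k : Int) :=
        ⟨(n * m).toNat, by
          rw [Int.toNat_of_nonneg hnm0]
          exact pvCount_lower L hpos n m (PySem.List.min?_mem hm) (by omega)⟩
      have hT1 : n ≤ pvCount L ((Nat.find hex : Nat) : Int) := Nat.find_spec hex
      have hmin : ∀ s : Int, 0 ≤ s → s < ((Nat.find hex : Nat) : Int) → pvCount L s < n := by
        intro s hs hlt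
        have h := Nat.find_min hex (m := s.toNat) (by omega)
        rw [Int.toNat_of_nonneg hs] at h
        omega
      have hKle : Nat.find hex ≤ (n * m).toNat :=
        Nat.find_min' hex (by
          rw [Int.toNat_of_nonneg hnm0]
          exact pvCount_lower L hpos n m (PySem.List.min?_mem hm) (by omega))
      have hK1 : 1 ≤ Nat.find hex := by
        by_contra hx
        have h0 : Nat.find hex = 0 := by omega
        rw [h0] at hT1
        simp only [Nat.cast_zero] at hT1
        rw [pvCount_zero L hpos] at hT1
        omega
      have hA : efficientCabScheduling n L = ((Nat.find hex : Nat) : Int) := by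
        rw [efficientCabScheduling, if_neg h1, hm]
        simp only [Option.getD_some]
        have h := pvALoop_eq n L _ hpos hT1 hmin ((n * m).toNat + 1) 0 le_rfl (by positivity)
          (by push_cast [Int.toNat_of_nonneg hnm0] at hKle ⊢; omega)
        rw [pvCount_zero L hpos] at h
        exact h
      have hB : efficientCabScheduling_alt n L = ((Nat.find hex : Nat) : Int) := by
        rw [efficientCabScheduling_alt, if_neg h1, if_neg (by omega), hm]
        simp only [Option.getD_some]
        exact pvBSearch_eq n L _ hpos (by positivity) hT1 hmin 1 (n * m) (by omega)
          (by exact_mod_cast hK1)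
          (by have := Int.toNat_of_nonneg hnm0; omega)
      rw [hA, hB]
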